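-- pv_equiv track=rewrite | github.com/thangdam97/MTL-Studio-3.0-LTS | pipeline/pipeline/librarian/content_parser.py | _filter_blanks
-- ===== SOURCE A (Python) =====
-- from typing import List, Optional
--
-- def _filter_blanks(paragraphs: List[str]) -> List[str]:
--     """Remove consecutive and trailing blank markers."""
--     filtered = []
--     for para in paragraphs:
--         if para == "<blank>":
--             if filtered and filtered[-1] != "<blank>":
--                 filtered.append(para)
--         else:
--             filtered.append(para)
--
--     # Remove trailing blanks
--     while filtered and filtered[-1] == "<blank>":
--         filtered.pop()
--
--     return filtered
-- ===== SOURCE B (Python) =====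
-- from itertools import groupby
-- from typing import List
--
-- def _filter_blanks(paragraphs: List[str]) -> List[str]:
--     """Remove consecutive and trailing blank markers (run-based pass)."""
--     result = []
--     for key, group in groupby(paragraphs):
--         if key == "<blank>":
--             result.append("<blank>")
--         else:
--             result.extend(group)
--     if result and result[0] == "<blank>":
--         result = result[1:]
--     if result and result[-1] == "<blank>":
--         result.pop()
--     return result
-- ===== Notes on version B (the rewrite author's own statement) =====
-- stated objective: alternative
-- what changed: Replaces A's stateful per-element loop (look at last appended element) plus a trailing while-pop by a run-based pass over itertools.groupby runs, collapsing each blank run to one marker, then stripping a single leading and a single trailing blank.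
import Mathlib
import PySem

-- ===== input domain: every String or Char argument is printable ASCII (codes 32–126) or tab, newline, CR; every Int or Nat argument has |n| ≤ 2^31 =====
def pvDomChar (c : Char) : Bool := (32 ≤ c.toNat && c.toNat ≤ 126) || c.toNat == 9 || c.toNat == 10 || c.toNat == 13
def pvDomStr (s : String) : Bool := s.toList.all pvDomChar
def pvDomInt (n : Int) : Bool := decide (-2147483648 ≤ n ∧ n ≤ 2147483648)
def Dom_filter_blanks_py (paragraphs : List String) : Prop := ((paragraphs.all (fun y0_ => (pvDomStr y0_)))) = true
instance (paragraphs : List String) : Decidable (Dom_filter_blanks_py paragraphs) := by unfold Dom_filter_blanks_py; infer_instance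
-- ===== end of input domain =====

-- B replaces A's stateful per-element loop and trailing while-pop by a run-based pass
-- (collapse each maximal blank run to one marker, then strip one leading and one trailing blank);
-- objective: alternative (same cost, different decomposition).


-- ===== PORT A =====
-- the 'for para in paragraphs' loop of A, carrying 'filtered'
def aLoop (filtered : List String) (paras : List String) : List String :=
  match paras with
  | [] => filtered
  | para :: rest =>
    if para = "<blank>" then
      if filtered ≠ [] ∧ filtered.getLast? ≠ some "<blank>" then
        aLoop (filtered ++ [para]) rest
      else
        aLoop filtered rest
    else
      aLoop (filtered ++ [para]) rest

-- the 'while filtered and filtered[-1] == "<blank>": filtered.pop()' loop of A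
def aPop (filtered : List String) : List String :=
  if h : filtered.getLast? = some "<blank>" then aPop filtered.dropLast else filtered
termination_by filtered.length
decreasing_by
  cases filtered with
  | nil => simp at h
  | cons a l => simp

def filter_blanks_py (paragraphs : List String) : List String :=
  aPop (aLoop [] paragraphs)

-- ===== PORT B =====
-- itertools.groupby: maximal runs of equal adjacent elements
def bRuns (l : List String) : List (List String) :=
  match l with
  | [] => []
  | x :: xs =>
    (x :: xs.takeWhile (· = x)) :: bRuns (xs.dropWhile (· = x))
termination_by l.length
decreasing_by
  simpa using Nat.lt_succ_of_le (List.length_dropWhile_le _ _)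

def filter_blanks_py_alt (paragraphs : List String) : List String :=
  let result := (bRuns paragraphs).foldl
    (fun acc r => if r.head? = some "<blank>" then acc ++ ["<blank>"] else acc ++ r) []
  let result := if result.head? = some "<blank>" then result.drop 1 else result
  if result.getLast? = some "<blank>" then result.dropLast else result

-- ===== PRECONDITION & SPEC =====
def Spec_filter_blanks_py (paragraphs : List String) (out : List String) : Prop := out = filter_blanks_py_alt paragraphs
instance (paragraphs : List String) (out : List String) : Decidable (Spec_filter_blanks_py paragraphs out) := by unfold Spec_filter_blanks_py; infer_instance

-- ===== CLAIM (what is proved, stated in full; the proofs are below) =====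
def Claim_equal_filter_blanks_py : Prop := ∀ (paragraphs : List String), Dom_filter_blanks_py paragraphs → Spec_filter_blanks_py paragraphs (filter_blanks_py paragraphs)

-- ===== LEMMAS AND PROOFS =====

-- proof skeleton: both sides equal a state-machine normal form 'core'
-- core s l: collapse blank runs to one "<blank>"; s = true means a blank would
-- currently be skipped (output empty or last output blank)
def core (s : Bool) (l : List String) : List String :=
  match l with
  | [] => []
  | p :: rest =>
    if p = "<blank>" then
      if s then core true rest else "<blank>" :: core true rest
    else
      p :: core false rest

theorem aLoop_eq_core (l : List String) :
    ∀ acc, aLoop acc l = acc ++ core (acc.isEmpty || acc.getLast? == some "<blank>") l := by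
  induction l with
  | nil => intro acc; simp [aLoop, core]
  | cons p rest ih =>
    intro acc
    by_cases hp : p = "<blank>"
    · subst hp
      by_cases hc : acc ≠ [] ∧ acc.getLast? ≠ some "<blank>"
      · have : (acc.isEmpty || acc.getLast? == some "<blank>") = false := by
          obtain ⟨h1, h2⟩ := hc
          simp [List.isEmpty_iff, h1, h2]
        rw [aLoop]; simp only [if_pos rfl, if_pos hc, this, ih]
        simp [core]
      · have : (acc.isEmpty || acc.getLast? == some "<blank>") = true := by
          rcases not_and_or.mp hc with h | h
          · simp [List.isEmpty_iff, not_not.mp h]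
          · simp [not_not.mp h]
        rw [aLoop]; simp only [if_pos rfl, if_neg hc, this, ih]
        simp [core]
    · rw [aLoop]; simp only [if_neg hp, ih]
      have h1 : (acc ++ [p]).isEmpty = false := by simp
      have h2 : (p == "<blank>") = false := by simp [hp]
      simp [core, h1, h2, hp]

theorem core_head_true (l : List String) : (core true l).head? ≠ some "<blank>" := by
  induction l with
  | nil => simp [core]
  | cons p rest ih =>
    by_cases hp : p = "<blank>"
    · simpa [core, hp] using ih
    · simp [core, hp]

theorem core_true_of_head_ne (l : List String) (h : l.head? ≠ some "<blank>") :
    core true l = core false l := by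
  cases l with
  | nil => rfl
  | cons p rest =>
    have hp : p ≠ "<blank>" := by simpa using h
    simp [core, hp]

-- core true skips a prefix of blanks
theorem core_true_blank_prefix (t : List String) (r : List String)
    (h : ∀ a ∈ t, a = "<blank>") : core true (t ++ r) = core true r := by
  induction t with
  | nil => rfl
  | cons a t ih =>
    have ha : a = "<blank>" := h a (by simp)
    simp only [List.cons_append, core, if_pos ha, if_pos rfl]
    exact ih (fun b hb => h b (by simp [hb]))

-- a nonblank prefix passes through with state false afterwards
theorem core_nonblank_prefix (t : List String) (s : Bool) (r : List String)
    (h : ∀ a ∈ t, a ≠ "<blank>") : t ≠ [] → core s (t ++ r) = t ++ core false r := by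
  induction t generalizing s with
  | nil => intro h'; exact absurd rfl h'
  | cons a t ih =>
    intro _
    have ha : a ≠ "<blank>" := h a (by simp)
    cases t with
    | nil => simp [core, ha]
    | cons b t' =>
      have hb : b ≠ "<blank>" := h b (by simp)
      have := ih false (fun x hx => h x (by simp at hx ⊢; tauto)) (by simp)
      simp only [List.cons_append, core, if_neg ha] at this ⊢
      simp only [if_neg hb] at this
      simp [this, hb]

theorem flatMap_bRuns (l : List String) :
    (bRuns l).flatMap (fun r => if r.head? = some "<blank>" then ["<blank>"] else r)
      = core false l := by
  induction l using bRuns.induct with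
  | case1 => simp [bRuns, core]
  | case2 x xs ih =>
    rw [bRuns]
    by_cases hx : x = "<blank>"
    · subst hx
      simp only [List.flatMap_cons, List.head?_cons, if_pos rfl, ih]
      have h1 : core false ("<blank>" :: xs)
          = "<blank>" :: core true xs := by simp [core]
      have h2 : core true xs = core false (xs.dropWhile (· = "<blank>")) := by
        conv_lhs => rw [← List.takeWhile_append_dropWhile (p := (· = "<blank>")) (l := xs)]
        rw [core_true_blank_prefix _ _ (by
          intro a ha
          simpa using List.mem_takeWhile_imp ha)]
        apply core_true_of_head_ne
        cases hd : xs.dropWhile (· = "<blank>") with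
        | nil => simp
        | cons y ys =>
          have := List.head?_dropWhile_not (p := (· = "<blank>")) (l := xs)
          rw [hd] at this
          simpa using this
      rw [h1, h2]
      simp
    · simp only [List.flatMap_cons, List.head?_cons, if_neg (by simpa using hx), ih]
      have : core false ((x :: xs.takeWhile (· = x)) ++ xs.dropWhile (· = x))
          = (x :: xs.takeWhile (· = x)) ++ core false (xs.dropWhile (· = x)) := by
        apply core_nonblank_prefix _ false _ _ (by simp)
        intro a ha
        rcases List.mem_cons.mp ha with h | h
        · simpa [h] using hx
        · have := List.mem_takeWhile_imp h
          simp at this; simpa [this] using hx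
      have hsplit : x :: xs = (x :: xs.takeWhile (· = x)) ++ xs.dropWhile (· = x) := by
        simp [List.takeWhile_append_dropWhile]
      rw [hsplit, this]
      simp [hx]

theorem foldl_append_gen {α β : Type} (g : β → List α) (rs : List β) :
    ∀ acc, rs.foldl (fun acc r => acc ++ g r) acc = acc ++ rs.flatMap g := by
  induction rs with
  | nil => simp
  | cons r rs ih => intro acc; simp [List.foldl_cons, ih]

theorem core_true_eq_strip (l : List String) :
    core true l = (if (core false l).head? = some "<blank>"
                   then (core false l).drop 1 else core false l) := by
  cases l with
  | nil => simp [core]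
  | cons p rest =>
    by_cases hp : p = "<blank>"
    · simp [core, hp]
    · simp [core, hp]

-- no two adjacent blanks in core output
def noAdjB : List String → Bool
  | [] => true
  | [_] => true
  | a :: b :: r => (!(a == "<blank>" && b == "<blank>")) && noAdjB (b :: r)

theorem core_noAdj (l : List String) : ∀ s, noAdjB (core s l) = true := by
  induction l with
  | nil => intro s; simp [core, noAdjB]
  | cons p rest ih =>
    intro s
    by_cases hp : p = "<blank>"
    · cases s with
      | true => simpa [core, hp] using ih true
      | false =>
        simp only [core, if_pos hp, if_neg (by decide : ¬(false = true))]
        have hh := core_head_true rest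
        have ht := ih true
        cases hc : core true rest with
        | nil => simp [noAdjB]
        | cons y ys =>
          rw [hc] at hh ht
          have hy : y ≠ "<blank>" := by simpa using hh
          simp [noAdjB, hy, ht]
    · simp only [core, if_neg hp]
      have ht := ih false
      cases hc : core false rest with
      | nil => simp [noAdjB]
      | cons y ys =>
        rw [hc] at ht
        simp [noAdjB, hp, ht]

theorem noAdj_last (ys : List String) :
    noAdjB (ys ++ ["<blank>"]) = true → ys.getLast? ≠ some "<blank>" := by
  induction ys with
  | nil => simp
  | cons y ys ih =>
    intro h
    cases ys with
    | nil =>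
      simp only [List.cons_append, List.nil_append] at h
      rw [noAdjB] at h
      have hsplit : ∀ a b : Bool, (a && b) = true → a = true ∧ b = true := by decide
      have := (hsplit _ _ h).1
      simp at this
      simpa using this
    | cons z zs =>
      have h2 : noAdjB ((z :: zs) ++ ["<blank>"]) = true := by
        simp only [List.cons_append] at h
        rw [noAdjB] at h
        have hsplit : ∀ a b : Bool, (a && b) = true → a = true ∧ b = true := by decide
        simpa using (hsplit _ _ h).2
      have := ih h2
      simpa using this

theorem aPop_eq_strip (xs : List String) (h : noAdjB xs = true) :
    aPop xs = (if xs.getLast? = some "<blank>" then xs.dropLast else xs) := by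
  rw [aPop]
  by_cases hl : xs.getLast? = some "<blank>"
  · simp only [dif_pos hl, if_pos hl]
    have hne : xs ≠ [] := by intro he; simp [he] at hl
    have hx : xs = xs.dropLast ++ ["<blank>"] := by
      have hg : xs.getLast hne = "<blank>" := by
        rw [List.getLast?_eq_some_getLast hne] at hl
        exact Option.some.inj hl
      calc xs = xs.dropLast ++ [xs.getLast hne] := (List.dropLast_append_getLast hne).symm
        _ = xs.dropLast ++ ["<blank>"] := by rw [hg]
    have hlast : xs.dropLast.getLast? ≠ some "<blank>" := by
      apply noAdj_last
      rw [← hx]; exact h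
    rw [aPop]
    simp [hlast]
  · simp [hl]

-- ===== VERDICT (by name: the statement is the Claim_ definition above) =====
theorem filter_blanks_py_spec : Claim_equal_filter_blanks_py := by
  intro paragraphs _
  unfold Spec_filter_blanks_py filter_blanks_py filter_blanks_py_alt
  rw [aLoop_eq_core]
  simp only [List.isEmpty_nil, Bool.true_or, List.nil_append]
  have hfun : (fun (acc : List String) (r : List String) =>
      if r.head? = some "<blank>" then acc ++ ["<blank>"] else acc ++ r)
      = (fun acc r => acc ++ (if r.head? = some "<blank>" then ["<blank>"] else r)) := by
    funext acc r; split <;> rfl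
  rw [hfun, foldl_append_gen, List.nil_append, flatMap_bRuns]
  rw [aPop_eq_strip _ (core_noAdj paragraphs true), ← core_true_eq_strip]
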